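-- pv_equiv track=rewrite | github.com/AniNotes/aninotes-project | AniNotes-repo/AninotesLibs/FlatCVLib/src/FlatCV_aninotes/FlatCV.py | removeNearSubsetElements
-- ===== SOURCE A (Python) =====
-- def isNearSubset(A, B, closeBnd): # A is near subset of B
--     if len(A) > len(B):
--         return False
--     else:
--         isNearSubset = True
--         for APt in A:
--             isNearInB = False
--             for BPt in B:
--                 AY, AX = APt
--                 BY, BX = BPt
--                 if APt == BPt or (abs(AY - BY) <= closeBnd and abs(AX - BX) <= closeBnd):
--                     isNearInB = True
--                     break
--             if not(isNearInB):
--                 isNearSubset = False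
--                 break
--         return isNearSubset
--
-- def removeNearSubsetElements(lst, closeBnd):
--     newLst = []
--     for itm in lst:
--         if itm not in newLst:
--             newLst.append(itm)
--     lst = newLst
--     finalLst = []
--     lstCopy = lst.copy()
--     for elem in lst:
--         otherElems = []
--         for otherElem in lstCopy:
--             if otherElem != elem:
--                 for pt in otherElem[1]:
--                     if pt not in otherElems:
--                         otherElems.append(pt)
--         if not isNearSubset(elem[1], otherElems, closeBnd):
--             finalLst.append(elem)
--         else: # MAYBE REMOVE? IDK... IF ISSUES --> CONSIDER
--             lstCopy.remove(elem)
--     return finalLst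
-- ===== SOURCE B (Python) =====
-- def removeNearSubsetElements(lst, closeBnd):
--     # Ordered dedup of the elements (set of hashable keys instead of a list scan).
--     seen = set()
--     uniq = []
--     for itm in lst:
--         k = (itm[0], tuple(itm[1]))
--         if k not in seen:
--             seen.add(k)
--             uniq.append(itm)
--     # cnt[p] = number of still-alive elements whose point set contains p.
--     # Built once; updated when an element is removed, so the per-element
--     # recomputation (and its quadratic dedup scan) of A disappears.
--     cnt = {}
--     for _, pts in uniq:
--         for p in set(pts):
--             cnt[p] = cnt.get(p, 0) + 1
--     final = []
--     for elem in uniq: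
--         name, pts = elem
--         own = set(pts)
--         # number of distinct points belonging to some OTHER alive element
--         othersCount = 0
--         for q, c in cnt.items():
--             if c - (1 if q in own else 0) > 0:
--                 othersCount += 1
--         nearSub = len(pts) <= othersCount
--         if nearSub:
--             for p in pts:
--                 py, px = p
--                 hit = False
--                 for q, c in cnt.items():
--                     if c - (1 if q in own else 0) > 0:
--                         qy, qx = q
--                         if p == q or (abs(py - qy) <= closeBnd and abs(px - qx) <= closeBnd):
--                             hit = True
--                             break
--                 if not hit:
--                     nearSub = False
--                     break
--         if nearSub:
--             # elem is a near-subset of the others' points: drop it from the alive counts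
--             for p in own:
--                 cnt[p] -= 1   # key always present: counted at initialisation
--         else:
--             final.append(elem)
--     return final
-- ===== Notes on version B (the rewrite author's own statement) =====
-- stated objective: faster
-- what changed: Instead of rebuilding, for every element, the union of all other elements' points with a quadratic list-membership dedup, B builds once a counter mapping each point to the number of alive elements containing it (and dedups elements via a hash set), decrementing it when an element is removed; each near-subset test then scans the counter's distinct points once.
import Mathlib
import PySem

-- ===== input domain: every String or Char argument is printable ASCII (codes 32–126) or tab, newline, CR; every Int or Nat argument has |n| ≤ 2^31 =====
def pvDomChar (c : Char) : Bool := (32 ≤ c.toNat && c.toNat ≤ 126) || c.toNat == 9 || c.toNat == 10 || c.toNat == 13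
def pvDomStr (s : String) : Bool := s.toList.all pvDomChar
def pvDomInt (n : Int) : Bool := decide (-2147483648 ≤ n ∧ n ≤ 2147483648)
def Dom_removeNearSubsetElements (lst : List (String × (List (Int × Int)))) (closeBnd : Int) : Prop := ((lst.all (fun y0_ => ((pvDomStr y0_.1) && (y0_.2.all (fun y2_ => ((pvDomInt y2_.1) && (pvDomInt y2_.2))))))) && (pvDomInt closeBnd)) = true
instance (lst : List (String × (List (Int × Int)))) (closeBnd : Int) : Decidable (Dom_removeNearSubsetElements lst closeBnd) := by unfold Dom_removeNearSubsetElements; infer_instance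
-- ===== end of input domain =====

-- B replaces A's per-element rebuild (with a quadratic list-dedup) of the other elements'
-- point union by a point → alive-element counter built once and decremented on removal
-- (objective: faster).

abbrev PvElem : Type := String × (List (Int × Int))
abbrev PvPt : Type := Int × Int

-- ===== PORT A =====
-- isNearSubset(A, B, closeBnd); the two flag-loops with break are the all/any folds
def pvIsNearSubset (A B : List PvPt) (closeBnd : Int) : Bool :=
  if A.length > B.length then false
  else
    A.all (fun apt => B.any (fun bpt =>
      apt == bpt || (decide (|apt.1 - bpt.1| ≤ closeBnd) && decide (|apt.2 - bpt.2| ≤ closeBnd))))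

-- the otherElems accumulation for one elem: dedup-append every point of every other element
def pvOtherElems (lstCopy : List PvElem) (elem : PvElem) : List PvPt :=
  lstCopy.foldl (fun oe other =>
    if other ≠ elem then
      other.2.foldl (fun oe2 pt => if oe2.contains pt then oe2 else oe2 ++ [pt]) oe
    else oe) []

-- one iteration of A's main loop; state = (finalLst, lstCopy).
-- lstCopy.remove(elem): elem is always present (lst was deduplicated), so remove? is some
def pvStepA (closeBnd : Int) (st : List PvElem × List PvElem) (elem : PvElem) :
    List PvElem × List PvElem :=
  let otherElems := pvOtherElems st.2 elem
  if !(pvIsNearSubset elem.2 otherElems closeBnd) then (st.1 ++ [elem], st.2)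
  else (st.1, (PySem.List.remove? st.2 elem).getD st.2)

def removeNearSubsetElements (lst : List (String × (List (Int × Int)))) (closeBnd : Int) :
    List (String × (List (Int × Int))) :=
  let newLst := lst.foldl (fun acc itm => if acc.contains itm then acc else acc ++ [itm]) []
  (newLst.foldl (pvStepA closeBnd) ([], newLst)).1

-- ===== PORT B =====
-- one iteration of B's main loop; state = (final, cnt) with cnt = point → number of alive
-- elements whose point set contains it
def pvStepB (closeBnd : Int) (st : List PvElem × PySem.Dict PvPt Int) (elem : PvElem) :
    List PvElem × PySem.Dict PvPt Int :=
  let own : PySem.Set PvPt := PySem.Set.ofList elem.2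
  let othersCount : Int := st.2.items.foldl (fun k qc =>
      if qc.2 - (if PySem.Set.contains own qc.1 then 1 else 0) > 0 then k + 1 else k) 0
  let nearSub := decide ((elem.2.length : Int) ≤ othersCount) && elem.2.all (fun p =>
      st.2.items.any (fun qc =>
        decide (qc.2 - (if PySem.Set.contains own qc.1 then 1 else 0) > 0) &&
        (p == qc.1 || (decide (|p.1 - qc.1.1| ≤ closeBnd) && decide (|p.2 - qc.1.2| ≤ closeBnd)))))
  -- cnt[p] -= 1 over the distinct points of a removed element (key always present: counted at init)
  if nearSub then (st.1, own.foldl (fun c p => c.insert p (c.getD p 0 - 1)) st.2)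
  else (st.1 ++ [elem], st.2)

def removeNearSubsetElements_alt (lst : List (String × (List (Int × Int)))) (closeBnd : Int) :
    List (String × (List (Int × Int))) :=
  -- ordered dedup with a membership set
  let uniq := (lst.foldl (fun (st : List PvElem × PySem.Set PvElem) itm =>
      if PySem.Set.contains st.2 itm then st
      else (st.1 ++ [itm], PySem.Set.add st.2 itm)) ([], PySem.Set.empty)).1
  -- cnt[p] = cnt.get(p, 0) + 1 over the distinct points of every element
  let cnt := uniq.foldl (fun c e =>
      (PySem.Set.ofList e.2).foldl (fun c2 p => c2.insert p (c2.getD p 0 + 1)) c)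
    PySem.Dict.empty
  (uniq.foldl (pvStepB closeBnd) ([], cnt)).1

-- ===== PRECONDITION & SPEC =====
def Spec_removeNearSubsetElements (lst : List (String × (List (Int × Int)))) (closeBnd : Int) (out : List (String × (List (Int × Int)))) : Prop := out = removeNearSubsetElements_alt lst closeBnd
instance (lst : List (String × (List (Int × Int)))) (closeBnd : Int) (out : List (String × (List (Int × Int)))) : Decidable (Spec_removeNearSubsetElements lst closeBnd out) := by unfold Spec_removeNearSubsetElements; infer_instance

-- ===== CLAIM (what is proved, stated in full; the proofs are below) =====
def Claim_equal_removeNearSubsetElements : Prop := ∀ (lst : List (String × (List (Int × Int)))) (closeBnd : Int), Dom_removeNearSubsetElements lst closeBnd → Spec_removeNearSubsetElements lst closeBnd (removeNearSubsetElements lst closeBnd)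

-- ===== LEMMAS AND PROOFS =====

-- A's element-dedup loop is exactly Set.ofList
theorem pvDedupA_eq (lst : List PvElem) :
    lst.foldl (fun acc itm => if acc.contains itm then acc else acc ++ [itm]) [] =
    PySem.Set.ofList lst := rfl

-- B's dedup loop keeps its list component equal to its set component
theorem pvDedupB_aux (xs : List PvElem) (s : PySem.Set PvElem) :
    (xs.foldl (fun (st : List PvElem × PySem.Set PvElem) itm =>
      if PySem.Set.contains st.2 itm then st
      else (st.1 ++ [itm], PySem.Set.add st.2 itm)) (s, s)) =
    (xs.foldl PySem.Set.add s, xs.foldl PySem.Set.add s) := by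
  induction xs generalizing s with
  | nil => rfl
  | cons x t ih =>
    by_cases h : x ∈ s
    · have hadd : PySem.Set.add s x = s := by simp [PySem.Set.add, h]
      simpa [h, hadd] using ih s
    · have hadd : PySem.Set.add s x = s ++ [x] := by simp [PySem.Set.add, h]
      simpa [h, hadd] using ih (s ++ [x])

theorem pvDedupB_eq (lst : List PvElem) :
    (lst.foldl (fun (st : List PvElem × PySem.Set PvElem) itm =>
      if PySem.Set.contains st.2 itm then st
      else (st.1 ++ [itm], PySem.Set.add st.2 itm)) ([], PySem.Set.empty)).1 =
    PySem.Set.ofList lst := by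
  rw [show (([], PySem.Set.empty) : List PvElem × PySem.Set PvElem) =
    ((PySem.Set.empty : PySem.Set PvElem), (PySem.Set.empty : PySem.Set PvElem)) from rfl]
  rw [pvDedupB_aux, PySem.Set.ofList_eq_foldl]
  rfl

-- membership in the otherElems accumulation
theorem pvOE_mem_aux (elem : PvElem) (alive : List PvElem) (acc : List PvPt) (q : PvPt) :
    (q ∈ alive.foldl (fun oe other => if other ≠ elem then PySem.Set.update oe other.2 else oe) acc)
    ↔ q ∈ acc ∨ ∃ e ∈ alive, e ≠ elem ∧ q ∈ e.2 := by
  induction alive generalizing acc with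
  | nil => simp
  | cons x t ih =>
    rw [List.foldl_cons]
    by_cases h : x = elem
    · rw [if_neg (by simp [h]), ih]
      subst h
      constructor
      · rintro (ha | ⟨e, he, hne, hq⟩)
        · exact Or.inl ha
        · exact Or.inr ⟨e, List.mem_cons_of_mem _ he, hne, hq⟩
      · rintro (ha | ⟨e, he, hne, hq⟩)
        · exact Or.inl ha
        · rcases List.mem_cons.1 he with rfl | he'
          · exact absurd rfl hne
          · exact Or.inr ⟨e, he', hne, hq⟩
    · rw [if_pos h, ih]
      rw [PySem.Set.mem_update]
      constructor
      · rintro ((ha | hx) | ⟨e, he, hne, hq⟩)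
        · exact Or.inl ha
        · exact Or.inr ⟨x, List.mem_cons_self .., h, hx⟩
        · exact Or.inr ⟨e, List.mem_cons_of_mem _ he, hne, hq⟩
      · rintro (ha | ⟨e, he, hne, hq⟩)
        · exact Or.inl (Or.inl ha)
        · rcases List.mem_cons.1 he with rfl | he'
          · exact Or.inl (Or.inr hq)
          · exact Or.inr ⟨e, he', hne, hq⟩

theorem pvOE_nodup_aux (elem : PvElem) (alive : List PvElem) (acc : List PvPt) (h : acc.Nodup) :
    (alive.foldl (fun oe other => if other ≠ elem then PySem.Set.update oe other.2 else oe) acc).Nodup := by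
  induction alive generalizing acc with
  | nil => exact h
  | cons x t ih =>
    rw [List.foldl_cons]
    by_cases hx : x = elem
    · rw [if_neg (by simp [hx])]; exact ih _ h
    · rw [if_pos hx]; exact ih _ (PySem.Set.nodup_update _ _ h)

theorem pvOtherElems_mem (alive : List PvElem) (elem : PvElem) (q : PvPt) :
    q ∈ pvOtherElems alive elem ↔ ∃ e ∈ alive, e ≠ elem ∧ q ∈ e.2 := by
  have h := pvOE_mem_aux elem alive [] q
  simp only [List.not_mem_nil, false_or] at h
  exact h

theorem pvOtherElems_nodup (alive : List PvElem) (elem : PvElem) :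
    (pvOtherElems alive elem).Nodup := pvOE_nodup_aux elem alive [] List.nodup_nil

-- the decrement loop of B: getD drops by 1 exactly on members of the (nodup) list
theorem pvGetD_foldl_insert_sub_one (l : List PvPt) (d : PySem.Dict PvPt Int) (q : PvPt)
    (hnd : l.Nodup) :
    (l.foldl (fun c p => c.insert p (c.getD p 0 - 1)) d).getD q 0 =
      d.getD q 0 - (if q ∈ l then 1 else 0) := by
  induction l generalizing d with
  | nil => simp
  | cons p t ih =>
    rw [List.foldl_cons, ih _ (List.nodup_cons.1 hnd).2]
    rw [PySem.Dict.getD_insert]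
    by_cases h : q = p
    · subst h
      have : q ∉ t := (List.nodup_cons.1 hnd).1
      simp [this]
    · simp [h, List.mem_cons]

-- B's counter initialisation counts, for every point, the elements containing it
theorem pvInit_getD (uniq : List PvElem) (c : PySem.Dict PvPt Int) (q : PvPt) :
    (uniq.foldl (fun c e =>
      (PySem.Set.ofList e.2).foldl (fun c2 p => c2.insert p (c2.getD p 0 + 1)) c) c).getD q 0 =
    c.getD q 0 + ((uniq.filter (fun e => decide (q ∈ e.2))).length : Int) := by
  induction uniq generalizing c with
  | nil => simp
  | cons e t ih =>
    rw [List.foldl_cons, ih, PySem.Dict.getD_foldl_insert_add_one]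
    have hcnt : (List.count q (PySem.Set.ofList e.2) : Int) = if q ∈ e.2 then 1 else 0 := by
      by_cases h : q ∈ e.2
      · rw [if_pos h]
        have h1 : q ∈ PySem.Set.ofList e.2 := (PySem.Set.mem_ofList _ _).2 h
        rw [List.count_eq_one_of_mem (PySem.Set.nodup_ofList e.2) h1]
        rfl
      · rw [if_neg h]
        have h1 : q ∉ PySem.Set.ofList e.2 := fun hq => h ((PySem.Set.mem_ofList _ _).1 hq)
        simp [List.count_eq_zero_of_not_mem h1]
    rw [hcnt, List.filter_cons]
    by_cases h : q ∈ e.2 <;> simp [h] <;> ring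

theorem pvInit_keys (uniq : List PvElem) (c : PySem.Dict PvPt Int) (q : PvPt) :
    (q ∈ (uniq.foldl (fun c e =>
      (PySem.Set.ofList e.2).foldl (fun c2 p => c2.insert p (c2.getD p 0 + 1)) c) c).keys) ↔
    q ∈ c.keys ∨ ∃ e ∈ uniq, q ∈ e.2 := by
  induction uniq generalizing c with
  | nil => simp
  | cons e t ih =>
    rw [List.foldl_cons, ih, PySem.Dict.keys_foldl_insert, PySem.Set.mem_update]
    constructor
    · rintro ((h | h) | ⟨e', he', hq⟩)
      · exact Or.inl h
      · exact Or.inr ⟨e, List.mem_cons_self .., (PySem.Set.mem_ofList _ _).1 h⟩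
      · exact Or.inr ⟨e', List.mem_cons_of_mem _ he', hq⟩
    · rintro (h | ⟨e', he', hq⟩)
      · exact Or.inl (Or.inl h)
      · rcases List.mem_cons.1 he' with rfl | he''
        · exact Or.inl (Or.inr ((PySem.Set.mem_ofList _ _).2 hq))
        · exact Or.inr ⟨e', he'', hq⟩

theorem pvInit_keys_nodup (uniq : List PvElem) (c : PySem.Dict PvPt Int) (h : c.keys.Nodup) :
    (uniq.foldl (fun c e =>
      (PySem.Set.ofList e.2).foldl (fun c2 p => c2.insert p (c2.getD p 0 + 1)) c) c).keys.Nodup := by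
  induction uniq generalizing c with
  | nil => exact h
  | cons e t ih =>
    rw [List.foldl_cons]
    exact ih _ (PySem.Dict.nodup_keys_foldl_insert _ _ _ h)

-- splitting the per-point element count at one occurrence of elem
theorem pvFilterLen (alive : List PvElem) (elem : PvElem) (hmem : elem ∈ alive) (q : PvPt) :
    (alive.filter (fun e => decide (q ∈ e.2))).length =
    (if q ∈ elem.2 then 1 else 0) + ((alive.erase elem).filter (fun e => decide (q ∈ e.2))).length := by
  have hperm := List.perm_cons_erase hmem
  rw [(hperm.filter _).length_eq, List.filter_cons]
  by_cases h : q ∈ elem.2 <;> simp [h] <;> omega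

-- the invariant tying B's counter to A's alive list (lstCopy)
def pvInv (alive : List PvElem) (cnt : PySem.Dict PvPt Int) : Prop :=
  alive.Nodup ∧ cnt.keys.Nodup ∧
  (∀ p : PvPt, cnt.getD p 0 = ((alive.filter (fun e => decide (p ∈ e.2))).length : Int)) ∧
  (∀ p : PvPt, ∀ e ∈ alive, p ∈ e.2 → p ∈ cnt.keys)

-- per-element decision: A's near-subset test equals B's counter-based test
theorem pvDecision_eq (closeBnd : Int) (alive : List PvElem) (cnt : PySem.Dict PvPt Int)
    (elem : PvElem) (hmem : elem ∈ alive) (hinv : pvInv alive cnt) :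
    pvIsNearSubset elem.2 (pvOtherElems alive elem) closeBnd =
      (decide ((elem.2.length : Int) ≤
        cnt.items.foldl (fun k qc =>
          if qc.2 - (if PySem.Set.contains (PySem.Set.ofList elem.2) qc.1 then 1 else 0) > 0
          then k + 1 else k) 0) &&
      elem.2.all (fun p =>
        cnt.items.any (fun qc =>
          decide (qc.2 - (if PySem.Set.contains (PySem.Set.ofList elem.2) qc.1 then 1 else 0) > 0) &&
          (p == qc.1 || (decide (|p.1 - qc.1.1| ≤ closeBnd) && decide (|p.2 - qc.1.2| ≤ closeBnd)))))) := by
  obtain ⟨hndA, hndK, hcnt, hkeys⟩ := hinv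
  have hown : ∀ k : PvPt, (if PySem.Set.contains (PySem.Set.ofList elem.2) k then (1:Int) else 0)
      = (if k ∈ elem.2 then 1 else 0) := by
    intro k
    by_cases h : k ∈ elem.2 <;>
      simp [PySem.Set.mem_ofList, h]
  have hP : ∀ q : PvPt, (cnt.getD q 0 - (if q ∈ elem.2 then (1:Int) else 0) > 0)
      ↔ q ∈ pvOtherElems alive elem := by
    intro q
    rw [hcnt q, pvOtherElems_mem, pvFilterLen alive elem hmem q]
    constructor
    · intro h
      have hpos : 0 < ((alive.erase elem).filter (fun e => decide (q ∈ e.2))).length := by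
        by_cases hq : q ∈ elem.2 <;> simp [hq] at h ⊢ <;> omega
      obtain ⟨e, he⟩ := List.exists_mem_of_length_pos hpos
      have h1 := List.mem_filter.1 he
      have h2 := (List.Nodup.mem_erase_iff hndA).1 h1.1
      exact ⟨e, h2.2, h2.1, by simpa using h1.2⟩
    · rintro ⟨e, he, hne, hq⟩
      have hf : e ∈ (alive.erase elem).filter (fun e => decide (q ∈ e.2)) :=
        List.mem_filter.2 ⟨(List.Nodup.mem_erase_iff hndA).2 ⟨hne, he⟩, by simpa using hq⟩
      have hpos := List.length_pos_of_mem hf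
      by_cases hq2 : q ∈ elem.2
      · rw [if_pos hq2, if_pos hq2]
        push_cast
        omega
      · rw [if_neg hq2, if_neg hq2]
        push_cast
        omega
  have hK : ∀ q : PvPt, q ∈ pvOtherElems alive elem → q ∈ cnt.keys := by
    intro q hq
    obtain ⟨e, he, _, hqe⟩ := (pvOtherElems_mem alive elem q).1 hq
    exact hkeys q e he hqe
  have hitems : cnt.items = cnt.keys.map (fun k => (k, cnt.getD k 0)) :=
    PySem.Dict.items_eq_map_keys cnt hndK 0
  -- othersCount = |otherElems|
  have hoc : (cnt.items.foldl (fun k qc =>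
      if qc.2 - (if PySem.Set.contains (PySem.Set.ofList elem.2) qc.1 then 1 else 0) > 0
      then k + 1 else k) 0)
      = ((pvOtherElems alive elem).length : Int) := by
    rw [PySem.List.foldl_ite_add_one
      (p := fun qc : PvPt × Int =>
        qc.2 - (if PySem.Set.contains (PySem.Set.ofList elem.2) qc.1 then 1 else 0) > 0)]
    rw [zero_add, hitems, List.countP_map]
    rw [List.countP_eq_length_filter]
    have hperm : (cnt.keys.filter ((fun qc : PvPt × Int =>
          decide (qc.2 - (if PySem.Set.contains (PySem.Set.ofList elem.2) qc.1 then 1 else 0) > 0)) ∘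
          (fun k => (k, cnt.getD k 0)))).Perm (pvOtherElems alive elem) := by
      rw [List.perm_ext_iff_of_nodup (List.Nodup.filter _ hndK) (pvOtherElems_nodup alive elem)]
      intro q
      rw [List.mem_filter]
      simp only [Function.comp]
      rw [hown q]
      constructor
      · rintro ⟨_, hq⟩
        exact (hP q).1 (by simpa using hq)
      · intro hq
        exact ⟨hK q hq, by simpa using (hP q).2 hq⟩
    rw [hperm.length_eq]
  -- the per-point existence tests agree
  have hany : ∀ p : PvPt,
      ((pvOtherElems alive elem).any (fun bpt =>
        p == bpt || (decide (|p.1 - bpt.1| ≤ closeBnd) && decide (|p.2 - bpt.2| ≤ closeBnd))))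
      = (cnt.items.any (fun qc =>
          decide (qc.2 - (if PySem.Set.contains (PySem.Set.ofList elem.2) qc.1 then 1 else 0) > 0) &&
          (p == qc.1 || (decide (|p.1 - qc.1.1| ≤ closeBnd) && decide (|p.2 - qc.1.2| ≤ closeBnd))))) := by
    intro p
    rw [Bool.eq_iff_iff]
    simp only [List.any_eq_true, hitems, List.mem_map]
    constructor
    · rintro ⟨q, hq, hnear⟩
      refine ⟨(q, cnt.getD q 0), ⟨q, hK q hq, rfl⟩, ?_⟩
      rw [Bool.and_eq_true]
      refine ⟨by rw [hown q]; simpa using (hP q).2 hq, hnear⟩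
    · rintro ⟨qc, ⟨k, hk, rfl⟩, hq⟩
      rw [Bool.and_eq_true] at hq
      refine ⟨k, ?_, hq.2⟩
      apply (hP k).1
      have := hq.1
      rw [hown k] at this
      simpa using this
  -- assemble
  rw [pvIsNearSubset, hoc]
  by_cases hl : elem.2.length > (pvOtherElems alive elem).length
  · rw [if_pos hl]
    have : ¬ ((elem.2.length : Int) ≤ ((pvOtherElems alive elem).length : Int)) := by omega
    simp [this]
  · rw [if_neg hl]
    have hle : ((elem.2.length : Int) ≤ ((pvOtherElems alive elem).length : Int)) := by omega
    rw [decide_eq_true hle, Bool.true_and]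
    rw [Bool.eq_iff_iff]
    simp only [List.all_eq_true]
    constructor
    · intro h p hp
      rw [← hany p]
      exact h p hp
    · intro h p hp
      rw [hany p]
      exact h p hp

-- removing elem from the alive list keeps the invariant for B's decremented counter
theorem pvInv_update (alive : List PvElem) (cnt : PySem.Dict PvPt Int) (elem : PvElem)
    (hmem : elem ∈ alive) (hinv : pvInv alive cnt) :
    pvInv (alive.erase elem)
      ((PySem.Set.ofList elem.2).foldl (fun c p => c.insert p (c.getD p 0 - 1)) cnt) := by
  obtain ⟨hndA, hndK, hcnt, hkeys⟩ := hinv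
  refine ⟨List.Nodup.erase _ hndA, ?_, ?_, ?_⟩
  · exact PySem.Dict.nodup_keys_foldl_insert _ _ _ hndK
  · intro p
    rw [pvGetD_foldl_insert_sub_one _ _ _ (PySem.Set.nodup_ofList _), hcnt p,
      pvFilterLen alive elem hmem p]
    by_cases hp : p ∈ elem.2
    · rw [if_pos hp, if_pos ((PySem.Set.mem_ofList _ _).2 hp)]
      push_cast
      omega
    · rw [if_neg hp, if_neg (fun hq => hp ((PySem.Set.mem_ofList _ _).1 hq))]
      push_cast
      omega
  · intro p e he hp
    rw [PySem.Dict.keys_foldl_insert, PySem.Set.mem_update]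
    exact Or.inl (hkeys p e (List.mem_of_mem_erase he) hp)

-- the two main loops produce the same final list under the invariant
theorem pvLoop_eq (closeBnd : Int) (rest : List PvElem) (fin alive : List PvElem)
    (cnt : PySem.Dict PvPt Int) (hsub : List.Sublist rest alive) (hinv : pvInv alive cnt) :
    (rest.foldl (pvStepA closeBnd) (fin, alive)).1 =
    (rest.foldl (pvStepB closeBnd) (fin, cnt)).1 := by
  induction rest generalizing fin alive cnt with
  | nil => rfl
  | cons elem rest ih =>
    have hmem : elem ∈ alive := hsub.subset (List.mem_cons_self ..)
    have hdec := pvDecision_eq closeBnd alive cnt elem hmem hinv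
    rw [List.foldl_cons, List.foldl_cons]
    cases hb : (decide ((elem.2.length : Int) ≤
        cnt.items.foldl (fun k qc =>
          if qc.2 - (if PySem.Set.contains (PySem.Set.ofList elem.2) qc.1 then 1 else 0) > 0
          then k + 1 else k) 0) &&
      elem.2.all (fun p =>
        cnt.items.any (fun qc =>
          decide (qc.2 - (if PySem.Set.contains (PySem.Set.ofList elem.2) qc.1 then 1 else 0) > 0) &&
          (p == qc.1 || (decide (|p.1 - qc.1.1| ≤ closeBnd) && decide (|p.2 - qc.1.2| ≤ closeBnd)))))) with
    | false =>
      have hA : pvStepA closeBnd (fin, alive) elem = (fin ++ [elem], alive) := by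
        simp only [pvStepA]
        rw [hdec, hb]
        rfl
      have hB : pvStepB closeBnd (fin, cnt) elem = (fin ++ [elem], cnt) := by
        simp only [pvStepB]
        rw [hb]
        rfl
      rw [hA, hB]
      exact ih _ _ _ (List.sublist_of_cons_sublist hsub) hinv
    | true =>
      have hA : pvStepA closeBnd (fin, alive) elem = (fin, alive.erase elem) := by
        simp only [pvStepA]
        rw [hdec, hb]
        simp [PySem.List.remove?_eq_some_erase alive elem hmem]
      have hB : pvStepB closeBnd (fin, cnt) elem =
          (fin, (PySem.Set.ofList elem.2).foldl (fun c p => c.insert p (c.getD p 0 - 1)) cnt) := by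
        simp only [pvStepB]
        rw [hb]
        rfl
      rw [hA, hB]
      have hsub' : List.Sublist rest (alive.erase elem) := by
        have := List.Sublist.erase elem hsub
        rwa [List.erase_cons_head] at this
      exact ih _ _ _ hsub' (pvInv_update alive cnt elem hmem hinv)

-- the invariant holds initially for the deduplicated list and the freshly built counter
theorem pvInv_init (uniq : List PvElem) (hnd : uniq.Nodup) :
    pvInv uniq (uniq.foldl (fun c e =>
      (PySem.Set.ofList e.2).foldl (fun c2 p => c2.insert p (c2.getD p 0 + 1)) c)
      PySem.Dict.empty) := by
  refine ⟨hnd, pvInit_keys_nodup _ _ (by simp [PySem.Dict.keys_empty]), ?_, ?_⟩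
  · intro p
    rw [pvInit_getD]
    simp [PySem.Dict.getD_empty]
  · intro p e he hp
    rw [pvInit_keys]
    exact Or.inr ⟨e, he, hp⟩

-- ===== VERDICT (by name: the statement is the Claim_ definition above) =====
theorem removeNearSubsetElements_spec : Claim_equal_removeNearSubsetElements := by
  intro lst closeBnd _
  unfold Spec_removeNearSubsetElements removeNearSubsetElements removeNearSubsetElements_alt
  rw [pvDedupA_eq, pvDedupB_eq]
  exact pvLoop_eq closeBnd _ [] _ _ (List.Sublist.refl _)
    (pvInv_init _ (PySem.Set.nodup_ofList _))
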